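-- pv_equiv track=rewrite | github.com/Sallyrideauto/codetree-TILs | 231122/독서실의 거리두기 2/study-cafe-keeping-distance-2.py | max_distance_between_people
-- ===== SOURCE A (Python) =====
-- def max_distance_between_people(N, seating):
--     # 빈 공간의 시작과 끝 인덱스를 찾는 함수
--     def find_empty_spaces(seating):
--         spaces = []
--         start = None
--         for i, seat in enumerate(seating):
--             if seat == '0':
--                 if start is None:
--                     start = i
--             else:
--                 if start is not None:
--                     spaces.append((start, i - 1))
--                     start = None
--         # 마지막 공간 추가
--         if start is not None:
--             spaces.append((start, N - 1))
--         return spaces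
--
--     # 최대 거리 계산
--     max_distance = 0
--     empty_spaces = find_empty_spaces(seating)
--     for start, end in empty_spaces:
--         # 구간의 길이 계산
--         length = end - start + 1
--
--         # 구간의 양쪽 끝에 사람이 없는 경우
--         if start == 0 or end == N - 1:
--             distance = length
--         # 구간의 양쪽 끝에 사람이 있는 경우
--         else:
--             distance = (length + 1) // 2
--         max_distance = max(max_distance, distance)
--
--     return max_distance
-- ===== SOURCE B (Python) =====
-- def max_distance_between_people(N, seating):
--     occupied = [i for i, seat in enumerate(seating) if seat != '0']
--     if occupied:
--         runs = [(0, occupied[0] - 1)] if occupied[0] > 0 else []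
--         runs += [(p + 1, q - 1) for p, q in zip(occupied, occupied[1:]) if q - p > 1]
--         if seating[-1] == '0':
--             runs.append((occupied[-1] + 1, N - 1))
--     else:
--         runs = [(0, N - 1)] if seating else []
--     return max([0] + [e - s + 1 if s == 0 or e == N - 1 else (e - s + 2) // 2 for s, e in runs])
-- ===== Notes on version B (the rewrite author's own statement) =====
-- stated objective: alternative
-- what changed: A discovers the empty runs with a stateful left-to-right scan (pending-start state machine appending (start,end) pairs) and accumulates the maximum in a second loop; B never scans for runs: it collects the occupied indices once and derives the run list arithmetically from them (leading run from the first index, interior runs from zipped consecutive index pairs, trailing run from the last index), then returns one max() over the scored runs.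
import Mathlib
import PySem

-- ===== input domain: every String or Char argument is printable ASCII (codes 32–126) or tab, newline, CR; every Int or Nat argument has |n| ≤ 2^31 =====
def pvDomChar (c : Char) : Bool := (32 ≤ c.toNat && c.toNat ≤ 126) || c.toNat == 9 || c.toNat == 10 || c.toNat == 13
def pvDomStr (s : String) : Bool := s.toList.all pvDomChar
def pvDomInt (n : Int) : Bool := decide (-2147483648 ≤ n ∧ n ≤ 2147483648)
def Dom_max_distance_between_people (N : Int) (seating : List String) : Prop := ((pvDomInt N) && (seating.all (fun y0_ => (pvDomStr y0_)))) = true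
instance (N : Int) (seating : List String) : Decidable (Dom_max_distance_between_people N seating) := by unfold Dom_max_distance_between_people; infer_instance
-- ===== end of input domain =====

-- B derives the empty runs arithmetically from the occupied-seat indices instead of A's stateful scan (objective: alternative algorithm, same cost).

-- ===== PORT A =====
-- distance of one empty run (start,end) exactly as A's loop body computes it
def pvDistA (N : Int) (se : Int × Int) : Int :=
  let length := se.2 - se.1 + 1
  if se.1 == 0 || se.2 == N - 1 then length else PySem.Int.floordiv (length + 1) 2

-- one step of find_empty_spaces' scan: state = (spaces so far, pending run start)
def pvStepA (st : List (Int × Int) × Option Int) (p : Int × String) : List (Int × Int) × Option Int :=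
  if p.2 == "0" then
    match st.2 with
    | none => (st.1, some p.1)
    | some s => (st.1, some s)
  else
    match st.2 with
    | some s => (st.1 ++ [(s, p.1 - 1)], none)
    | none => (st.1, none)

def pvFindEmptySpaces (N : Int) (seating : List String) : List (Int × Int) :=
  let r := (PySem.List.enumerate seating 0).foldl pvStepA ([], none)
  match r.2 with
  | some s => r.1 ++ [(s, N - 1)]
  | none => r.1

def max_distance_between_people (N : Int) (seating : List String) : Int :=
  (pvFindEmptySpaces N seating).foldl (fun md se => max md (pvDistA N se)) 0

-- ===== PORT B =====
-- score of one run, as in Source B's final comprehension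
def pvScore (N : Int) (se : Int × Int) : Int :=
  if se.1 == 0 || se.2 == N - 1 then se.2 - se.1 + 1 else PySem.Int.floordiv (se.2 - se.1 + 2) 2

def max_distance_between_people_alt (N : Int) (seating : List String) : Int :=
  let occupied := (PySem.List.enumerate seating 0).filterMap (fun p => if p.2 != "0" then some p.1 else none)
  let runs : List (Int × Int) :=
    match occupied with
    | [] => if seating.isEmpty then [] else [(0, N - 1)]
    | f :: rest =>
      (if f > 0 then [((0 : Int), f - 1)] else [])
      ++ ((f :: rest).zip rest).filterMap (fun pq => if pq.2 - pq.1 > 1 then some (pq.1 + 1, pq.2 - 1) else none)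
      ++ (if PySem.List.pyGet? seating (-1) == some "0" then [((f :: rest).getLastD 0 + 1, N - 1)] else [])
  -- Python's max([0] + scores) over this nonempty Int list = left fold of max from 0 (exact: Int ties are equal values)
  (runs.map (pvScore N)).foldl max 0

-- ===== PRECONDITION & SPEC =====
def Spec_max_distance_between_people (N : Int) (seating : List String) (out : Int) : Prop := out = max_distance_between_people_alt N seating
instance (N : Int) (seating : List String) (out : Int) : Decidable (Spec_max_distance_between_people N seating out) := by unfold Spec_max_distance_between_people; infer_instance

-- ===== CLAIM (what is proved, stated in full; the proofs are below) =====
def Claim_equal_max_distance_between_people : Prop := ∀ (N : Int) (seating : List String), Dom_max_distance_between_people N seating → Spec_max_distance_between_people N seating (max_distance_between_people N seating)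

-- ===== LEMMAS AND PROOFS =====

-- recursive characterisation of find_empty_spaces' output from scan position i with pending start
def pvRunsFrom (N : Int) (i : Int) (pend : Option Int) : List String → List (Int × Int)
  | [] => match pend with | some s => [(s, N - 1)] | none => []
  | x :: xs =>
    if x == "0" then
      pvRunsFrom N (i + 1) (match pend with | none => some i | some s => some s) xs
    else
      match pend with
      | some s => (s, i - 1) :: pvRunsFrom N (i + 1) none xs
      | none => pvRunsFrom N (i + 1) none xs

-- occupied indices of xs counting from i
def pvOccFrom (i : Int) : List String → List Int
  | [] => []
  | x :: xs => if x == "0" then pvOccFrom (i + 1) xs else i :: pvOccFrom (i + 1) xs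

-- does A's scan of the suffix xs (current pending state pend) end with an open run?
def pvGuard (pend : Option Int) (xs : List String) : Bool :=
  match xs.getLast? with | some y => y == "0" | none => pend.isSome

-- the runs strictly after the occupied index p, built from the remaining occupied indices
def pvTail (N : Int) (g : Bool) (p : Int) : List Int → List (Int × Int)
  | [] => if g then [(p + 1, N - 1)] else []
  | q :: occ => (if q - p > 1 then [(p + 1, q - 1)] else []) ++ pvTail N g q occ

lemma pvFind_eq_runs (N : Int) (xs : List String) : ∀ (i : Int) (sp : List (Int × Int)) (st : Option Int),
    (match ((PySem.List.enumerate xs i).foldl pvStepA (sp, st)).2 with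
      | some s => ((PySem.List.enumerate xs i).foldl pvStepA (sp, st)).1 ++ [(s, N - 1)]
      | none => ((PySem.List.enumerate xs i).foldl pvStepA (sp, st)).1)
    = sp ++ pvRunsFrom N i st xs := by
  intro i sp st
  induction xs generalizing i sp st with
  | nil => cases st <;> simp [PySem.List.enumerate_nil, pvRunsFrom]
  | cons x xs ih =>
    rw [PySem.List.enumerate_cons, List.foldl_cons]
    by_cases hx : x = "0"
    · cases st with
      | none => simp [pvStepA, hx, pvRunsFrom, ih]
      | some s => simp [pvStepA, hx, pvRunsFrom, ih]
    · cases st with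
      | none => simp [pvStepA, hx, pvRunsFrom, ih]
      | some s => simp [pvStepA, hx, pvRunsFrom, ih (i+1) (sp ++ [(s, i-1)]) none]

lemma pvOcc_eq (xs : List String) : ∀ (i : Int),
    (PySem.List.enumerate xs i).filterMap (fun p => if p.2 != "0" then some p.1 else none)
      = pvOccFrom i xs := by
  intro i
  induction xs generalizing i with
  | nil => simp [PySem.List.enumerate_nil, pvOccFrom]
  | cons x xs ih =>
    rw [PySem.List.enumerate_cons]
    have h := ih (i + 1)
    by_cases hx : x = "0" <;> simp at h ⊢ <;> simp [pvOccFrom, hx, h]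

lemma pvGuard_last (pend : Option Int) (x : String) (xs : List String) :
    pvGuard pend (x :: xs) = ((x :: xs).getLast? == some "0") := by
  unfold pvGuard
  cases h : (x :: xs).getLast? with
  | none => simp at h
  | some y => simp

lemma pvGuard_step (pend : Option Int) (x : String) (xs : List String) :
    pvGuard pend (x :: xs) = pvGuard (if x == "0" then some 0 else none) xs := by
  cases xs with
  | nil => by_cases hx : x = "0" <;> simp [pvGuard, hx]
  | cons y ys =>
    cases h : (y :: ys).getLast? with
    | none => simp at h
    | some z => simp [pvGuard, h]

lemma pvGuard_congr (p1 p2 : Option Int) (h : p1.isSome = p2.isSome) (xs : List String) :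
    pvGuard p1 xs = pvGuard p2 xs := by
  cases xs with
  | nil => simpa [pvGuard] using h
  | cons y ys => rfl

-- if a cons list has no occupied seat, its last element is "0"
lemma pvGuard_occ_nil (xs : List String) : ∀ (i : Int) (x : String) (pend : Option Int),
    x = "0" → pvOccFrom i xs = [] → pvGuard pend (x :: xs) = true := by
  induction xs with
  | nil => intro i x pend hx _; simp [pvGuard, hx]
  | cons y ys ih =>
    intro i x pend hx h
    by_cases hy : y = "0"
    · rw [pvGuard_step]
      exact ih (i + 1) y _ hy (by simpa [pvOccFrom, hy] using h)
    · simp [pvOccFrom, hy] at h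

-- occupied indices counted from i are ≥ i
lemma pvOcc_head (xs : List String) : ∀ (i q : Int) (occ : List Int),
    pvOccFrom i xs = q :: occ → i ≤ q := by
  induction xs with
  | nil => intro i q occ h; simp [pvOccFrom] at h
  | cons x xs ih =>
    intro i q occ h
    by_cases hx : x = "0"
    · simp [pvOccFrom, hx] at h
      have := ih (i + 1) q occ h
      omega
    · simp [pvOccFrom, hx] at h
      omega

-- the A-scan's runs, expressed over the occupied indices
lemma pvRuns_occ (N : Int) (xs : List String) : ∀ (i : Int),
    (∀ s : Int, pvRunsFrom N i (some s) xs
        = (match pvOccFrom i xs with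
           | [] => [(s, N - 1)]
           | q :: occ => (s, q - 1) :: pvTail N (pvGuard (some s) xs) q occ))
    ∧ pvRunsFrom N i none xs = pvTail N (pvGuard none xs) (i - 1) (pvOccFrom i xs) := by
  induction xs with
  | nil =>
    intro i
    constructor
    · intro s; simp [pvRunsFrom, pvOccFrom]
    · simp [pvRunsFrom, pvOccFrom, pvTail, pvGuard]
  | cons x xs ih =>
    intro i
    by_cases hx : x = "0"
    · constructor
      · intro s
        rw [show pvRunsFrom N i (some s) (x :: xs)
              = pvRunsFrom N (i + 1) (some s) xs from by simp [pvRunsFrom, hx]]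
        rw [(ih (i + 1)).1 s]
        rw [show pvOccFrom i (x :: xs) = pvOccFrom (i + 1) xs from by simp [pvOccFrom, hx]]
        cases h : pvOccFrom (i + 1) xs with
        | nil => rfl
        | cons q occ =>
          have hg : pvGuard (some s) (x :: xs) = pvGuard (some s) xs := by
            rw [pvGuard_step (some s) x xs]
            exact pvGuard_congr _ _ (by simp [hx]) xs
          rw [hg]
      · rw [show pvRunsFrom N i none (x :: xs)
              = pvRunsFrom N (i + 1) (some i) xs from by simp [pvRunsFrom, hx]]
        rw [(ih (i + 1)).1 i]
        rw [show pvOccFrom i (x :: xs) = pvOccFrom (i + 1) xs from by simp [pvOccFrom, hx]]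
        cases h : pvOccFrom (i + 1) xs with
        | nil =>
          rw [show pvTail N (pvGuard none (x :: xs)) (i - 1) [] =
                if pvGuard none (x :: xs) then [(i - 1 + 1, N - 1)] else [] from rfl]
          rw [pvGuard_occ_nil xs (i + 1) x none hx h]
          simp
        | cons q occ =>
          have hq : i + 1 ≤ q := pvOcc_head xs (i + 1) q occ h
          rw [show pvTail N (pvGuard none (x :: xs)) (i - 1) (q :: occ)
                = (if q - (i - 1) > 1 then [(i - 1 + 1, q - 1)] else [])
                  ++ pvTail N (pvGuard none (x :: xs)) q occ from rfl]
          rw [if_pos (by omega)]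
          have hg : pvGuard none (x :: xs) = pvGuard (some i) xs := by
            rw [pvGuard_step none x xs]
            exact pvGuard_congr _ _ (by simp [hx]) xs
          rw [hg]
          norm_num
    · constructor
      · intro s
        rw [show pvRunsFrom N i (some s) (x :: xs)
              = (s, i - 1) :: pvRunsFrom N (i + 1) none xs from by simp [pvRunsFrom, hx]]
        rw [(ih (i + 1)).2]
        rw [show pvOccFrom i (x :: xs) = i :: pvOccFrom (i + 1) xs from by simp [pvOccFrom, hx]]
        have hg : pvGuard (some s) (x :: xs) = pvGuard none xs := by
          rw [pvGuard_step (some s) x xs]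
          exact pvGuard_congr _ _ (by simp [hx]) xs
        rw [hg]
        norm_num
      · rw [show pvRunsFrom N i none (x :: xs)
              = pvRunsFrom N (i + 1) none xs from by simp [pvRunsFrom, hx]]
        rw [(ih (i + 1)).2]
        rw [show pvOccFrom i (x :: xs) = i :: pvOccFrom (i + 1) xs from by simp [pvOccFrom, hx]]
        rw [show pvTail N (pvGuard none (x :: xs)) (i - 1) (i :: pvOccFrom (i + 1) xs)
              = (if i - (i - 1) > 1 then [(i - 1 + 1, i - 1)] else [])
                ++ pvTail N (pvGuard none (x :: xs)) i (pvOccFrom (i + 1) xs) from rfl]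
        rw [if_neg (by omega)]
        have hg : pvGuard none (x :: xs) = pvGuard none xs := by
          rw [pvGuard_step none x xs]
          exact pvGuard_congr _ _ (by simp [hx]) xs
        rw [hg]
        simp

-- pvTail flattened into B's zip-filter ++ trailing form
lemma pvTail_flat (N : Int) (g : Bool) : ∀ (occ : List Int) (p : Int),
    pvTail N g p occ
      = ((p :: occ).zip occ).filterMap (fun pq => if pq.2 - pq.1 > 1 then some (pq.1 + 1, pq.2 - 1) else none)
        ++ (if g then [((p :: occ).getLastD 0 + 1, N - 1)] else []) := by
  intro occ
  induction occ with
  | nil => intro p; cases g <;> simp [pvTail]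
  | cons q occ ih =>
    intro p
    rw [show pvTail N g p (q :: occ)
          = (if q - p > 1 then [(p + 1, q - 1)] else []) ++ pvTail N g q occ from rfl]
    rw [ih q]
    by_cases hq : q - p > 1 <;> simp [hq, List.getLastD_cons]

lemma pvScore_eq (N : Int) (se : Int × Int) : pvScore N se = pvDistA N se := by
  unfold pvScore pvDistA
  split_ifs with h
  · rfl
  · congr 1
    ring

lemma pvFold_score (N : Int) (l : List (Int × Int)) :
    (l.map (pvScore N)).foldl max 0 = l.foldl (fun md se => max md (pvDistA N se)) 0 := by
  rw [List.foldl_map]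
  have : (fun (b : Int) (se : Int × Int) => max b (pvScore N se))
       = (fun md se => max md (pvDistA N se)) := by
    funext b se
    rw [pvScore_eq]
  rw [this]

lemma pvTop (N : Int) (seating : List String) :
    max_distance_between_people N seating = max_distance_between_people_alt N seating := by
  have hA : max_distance_between_people N seating
      = (pvRunsFrom N 0 none seating).foldl (fun md se => max md (pvDistA N se)) 0 := by
    simp only [max_distance_between_people, pvFindEmptySpaces]
    rw [pvFind_eq_runs N seating 0 [] none]
    simp
  rw [hA]
  unfold max_distance_between_people_alt
  rw [pvOcc_eq seating 0]
  cases seating with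
  | nil => simp [pvRunsFrom, pvOccFrom]
  | cons x xs =>
    rw [(pvRuns_occ N (x :: xs) 0).2, pvFold_score]
    congr 1
    cases h : pvOccFrom 0 (x :: xs) with
    | nil =>
      rw [show pvTail N (pvGuard none (x :: xs)) (0 - 1) [] =
            if pvGuard none (x :: xs) then [(0 - 1 + 1, N - 1)] else [] from rfl]
      have hx : x = "0" := by
        by_cases hx : x = "0"
        · exact hx
        · simp [pvOccFrom, hx] at h
      rw [pvGuard_occ_nil xs 1 x none hx (by simpa [pvOccFrom, hx] using h)]
      simp
    | cons f rest =>
      rw [show pvTail N (pvGuard none (x :: xs)) (0 - 1) (f :: rest)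
            = (if f - (0 - 1) > 1 then [(0 - 1 + 1, f - 1)] else [])
              ++ pvTail N (pvGuard none (x :: xs)) f rest from rfl]
      rw [pvTail_flat N (pvGuard none (x :: xs)) rest f]
      rw [pvGuard_last none x xs, ← List.append_assoc]
      simp only [PySem.List.pyGet?_neg_one]
      congr 1
      congr 1
      by_cases hf : f > 0
      · rw [if_pos (by omega), if_pos hf]
        norm_num
      · rw [if_neg (by omega), if_neg hf]

-- ===== VERDICT (by name: the statement is the Claim_ definition above) =====
theorem max_distance_between_people_spec : Claim_equal_max_distance_between_people := by
  intro N seating _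
  unfold Spec_max_distance_between_people
  exact pvTop N seating
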